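-- pv_equiv track=rewrite | github.com/Canyanwu/Sudoku-Solver | sudoku.py | generate_grids_with_num
-- ===== SOURCE A (Python) =====
-- import copy # importing copy module
--
-- def subgrid_values(grid, row, col):
--     val = []
--     n = int(len(grid)**(0.5))   # get dimension of inner box
--     r = (row//n)*n   # get starting row
--     c = (col//n)*n   # get starting col
--     for i in range(r, r+n):
--         for j in range(c, c+n):
--             val.append(grid[i][j])
--     return val
--
-- def validate_subgrid(grid, num, row, col):
--     subGrid = subgrid_values(grid, row, col)
--     for i in range(len(subGrid)):
--         if subGrid[i] == num:
--             return True
--     return False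
--
-- def validate_row(grid, num, row):
--     for i in range(len(grid)):
--         if(grid[row][i] == num):
--             return True
--     return False
--
-- def validate_col(grid, num, col):
--     for i in range(len(grid)):
--         if(grid[i][col] == num):
--             return True
--     return False
--
-- def valid_entry(grid, num, r, c):
--     row, col = r, c
--     if grid[r][c] == 'x':
--         if (validate_row(grid, num, row) == False) and (validate_col(grid, num, col) == False) and (validate_subgrid(grid, num, row, col) == False):
--             return True
--         else:
--             return False
--     else:
--         return False
--
-- def fill_in(grid, num):
--     for r in range(len(grid)):
--         for c in range(len(grid)):
--             if grid[r][c] == 'x'and (valid_entry(grid, num, r, c)):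
--                 grid[r][c] = num
--     return grid
--
-- def check_num_in_all_rows(grid, num):
--     for r in range(len(grid)):
--         if num not in grid[r]:
--             return False
--     return True
--
-- def generate_grids_with_num(grid, num):
--     listOfGrids = []
--     for r in range(len(grid)):
--         for c in range(len(grid)):
--             if grid[r][c] == 'x'and (valid_entry(grid, num, r, c)):
--                 gridCopy = copy.deepcopy(grid)
--                 gridCopy[r][c] = num
--                 matrix = fill_in(gridCopy, num)
--                 if(check_num_in_all_rows(matrix, num)):
--                     listOfGrids.append(matrix)
--     return listOfGrids
-- ===== SOURCE B (Python) =====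
-- def _place_and_fill(grid, num, N, n, nb, row_has, col_has, box_has, r0, c0):
--     g = [row[:] for row in grid]
--     rh, ch = row_has[:], col_has[:]
--     bh = [row[:] for row in box_has]
--     g[r0][c0] = num
--     rh[r0] = True
--     ch[c0] = True
--     bh[r0 // n][c0 // n] = True
--     for r in range(N):
--         for c in range(N):
--             if g[r][c] == 'x' and not (rh[r] or ch[c] or bh[r // n][c // n]):
--                 g[r][c] = num
--                 rh[r] = True
--                 ch[c] = True
--                 bh[r // n][c // n] = True
--     if all(rh):
--         return g
--     return None
--
--
-- def generate_grids_with_num(grid, num):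
--     N = len(grid)
--     if N == 0:
--         return []
--     n = int(N ** 0.5)
--     nb = (N - 1) // n + 1
--     row_has = [num in row for row in grid]
--     col_has = [any(grid[r][c] == num for r in range(N)) for c in range(N)]
--     box_has = [[any(grid[br * n + i][bc * n + j] == num for i in range(n) for j in range(n))
--                 for bc in range(nb)] for br in range(nb)]
--     out = []
--     for r in range(N):
--         for c in range(N):
--             if grid[r][c] == 'x' and not (row_has[r] or col_has[c] or box_has[r // n][c // n]):
--                 m = _place_and_fill(grid, num, N, n, nb, row_has, col_has, box_has, r, c)
--                 if m is not None:
--                     out.append(m)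
--     return out
-- ===== Notes on version B (the rewrite author's own statement) =====
-- stated objective: faster
-- what changed: B precomputes row/column/box 'num already present' boolean flags once and keeps them updated incrementally during the same row-major greedy fill, replacing A's O(N) row/col/box scans (and the final per-row membership scan) at every cell with O(1) flag tests.
-- outside the precondition, e.g. on generate_grids_with_num([['x', '']], ''): A returns [[['', '']]], B returns []
import Mathlib
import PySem

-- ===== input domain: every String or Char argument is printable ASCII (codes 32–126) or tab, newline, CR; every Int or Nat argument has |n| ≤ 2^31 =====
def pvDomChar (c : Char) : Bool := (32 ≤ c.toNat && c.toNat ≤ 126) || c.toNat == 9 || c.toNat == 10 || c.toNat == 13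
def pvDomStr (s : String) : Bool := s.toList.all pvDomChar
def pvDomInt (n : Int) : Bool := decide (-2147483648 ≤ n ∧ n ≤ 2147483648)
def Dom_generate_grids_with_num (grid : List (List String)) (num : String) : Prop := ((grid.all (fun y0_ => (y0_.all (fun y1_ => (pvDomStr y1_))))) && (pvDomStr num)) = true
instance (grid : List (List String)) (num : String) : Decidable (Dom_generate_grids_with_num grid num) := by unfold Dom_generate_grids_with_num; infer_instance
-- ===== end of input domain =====

-- B precomputes row/column/box 'num present' boolean flags and updates them incrementally during
-- the same row-major greedy fill, replacing A's per-cell row/col/subgrid scans (objective: faster).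
-- A does not mutate its argument (it deep-copies); the equivalence is about the return value.

-- shared 2-d list read/write ('g[r][c]' / 'g[r][c] = v'); an out-of-range read yields the default
-- (Python raises there; Pre_ excludes such inputs)
def pvGet2 {α : Type} (d : α) (g : List (List α)) (r c : Nat) : α := (g.getD r []).getD c d
def pvSet2 {α : Type} (g : List (List α)) (r c : Nat) (v : α) : List (List α) := g.set r ((g.getD r []).set c v)

-- int(N ** 0.5): largest k ≤ N with k*k ≤ N, i.e. floor square root (exact on the sizes that occur)
def pvIntSqrtGo (N : Nat) : Nat → Nat
  | 0 => 0
  | (k+1) => if (k+1)*(k+1) ≤ N then k+1 else pvIntSqrtGo N k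
def pvIntSqrt (N : Nat) : Nat := pvIntSqrtGo N N

-- ===== PORT A =====
def subgrid_values (g : List (List String)) (row col : Nat) : List String :=
  let n := pvIntSqrt g.length
  let r := (row / n) * n
  let c := (col / n) * n
  (List.range n).foldl (fun val i => (List.range n).foldl (fun val j => val ++ [pvGet2 "" g (r + i) (c + j)]) val) []

def validate_subgrid (g : List (List String)) (num : String) (row col : Nat) : Bool :=
  (subgrid_values g row col).any (fun v => v == num)

def validate_row (g : List (List String)) (num : String) (row : Nat) : Bool :=
  (List.range g.length).any (fun i => pvGet2 "" g row i == num)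

def validate_col (g : List (List String)) (num : String) (col : Nat) : Bool :=
  (List.range g.length).any (fun i => pvGet2 "" g i col == num)

def valid_entry (g : List (List String)) (num : String) (r c : Nat) : Bool :=
  if pvGet2 "" g r c == "x" then
    (!validate_row g num r) && (!validate_col g num c) && (!validate_subgrid g num r c)
  else false

def fill_in (g : List (List String)) (num : String) : List (List String) :=
  (List.range g.length).foldl (fun g1 r =>
    (List.range g.length).foldl (fun g2 c =>
      if pvGet2 "" g2 r c == "x" && valid_entry g2 num r c then pvSet2 g2 r c num else g2) g1) g

def check_num_in_all_rows (g : List (List String)) (num : String) : Bool :=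
  (List.range g.length).all (fun r => (g.getD r []).contains num)

def generate_grids_with_num (grid : List (List String)) (num : String) : List (List (List String)) :=
  (List.range grid.length).foldl (fun L r =>
    (List.range grid.length).foldl (fun L c =>
      if pvGet2 "" grid r c == "x" && valid_entry grid num r c then
        let gridCopy := pvSet2 grid r c num
        let matrix := fill_in gridCopy num
        if check_num_in_all_rows matrix num then L ++ [matrix] else L
      else L) L) []

-- ===== PORT B =====
-- state: (grid, row flags, col flags, box flag matrix); flags are updated in O(1) per filled cell
def pvPlaceAndFill (grid : List (List String)) (num : String) (N n : Nat)
    (rh ch : List Bool) (bh : List (List Bool)) (r0 c0 : Nat) : Option (List (List String)) :=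
  let st := (List.range N).foldl (fun st r =>
    (List.range N).foldl (fun st c =>
      if pvGet2 "" st.1 r c == "x" && !(st.2.1.getD r false || st.2.2.1.getD c false || pvGet2 false st.2.2.2 (r / n) (c / n)) then
        (pvSet2 st.1 r c num, st.2.1.set r true, st.2.2.1.set c true, pvSet2 st.2.2.2 (r / n) (c / n) true)
      else st) st)
    (pvSet2 grid r0 c0 num, rh.set r0 true, ch.set c0 true, pvSet2 bh (r0 / n) (c0 / n) true)
  if st.2.1.all (fun b => b) then some st.1 else none

def generate_grids_with_num_alt (grid : List (List String)) (num : String) : List (List (List String)) :=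
  let N := grid.length
  if N = 0 then []
  else
    let n := pvIntSqrt N
    let nb := (N - 1) / n + 1
    let rh := grid.map (fun row => row.contains num)
    let ch := (List.range N).map (fun c => (List.range N).any (fun r => pvGet2 "" grid r c == num))
    let bh := (List.range nb).map (fun br => (List.range nb).map (fun bc =>
      (List.range n).any (fun i => (List.range n).any (fun j => pvGet2 "" grid (br * n + i) (bc * n + j) == num))))
    (List.range N).foldl (fun out r =>
      (List.range N).foldl (fun out c =>
        if pvGet2 "" grid r c == "x" && !(rh.getD r false || ch.getD c false || pvGet2 false bh (r / n) (c / n)) then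
          match pvPlaceAndFill grid num N n rh ch bh r c with
          | some m => out ++ [m]
          | none => out
        else out) out) []

-- ===== PRECONDITION & SPEC =====
-- Pre_ excludes non-square grids and side lengths N not divisible by ⌊√N⌋ (N = 5, 7, …), on which
-- A's unguarded grid[r][c] / subgrid indexing raises IndexError; a few such grids happen to avoid
-- the raising access and still return (see the cited examples) — they are excluded with that shape.
def Pre_generate_grids_with_num (grid : List (List String)) (num : String) : Prop :=
  (∀ row ∈ grid, row.length = grid.length) ∧ pvIntSqrt grid.length ∣ grid.length
instance (grid : List (List String)) (num : String) : Decidable (Pre_generate_grids_with_num grid num) := by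
  unfold Pre_generate_grids_with_num; infer_instance

def pvWitness_generate_grids_with_num : List (List String) × String :=
  ([["x", "x", "x", "x"], ["x", "x", "x", "x"], ["x", "x", "x", "x"], ["x", "x", "x", "x"]], "1")

def Spec_generate_grids_with_num (grid : List (List String)) (num : String) (out : List (List (List String))) : Prop := out = generate_grids_with_num_alt grid num
instance (grid : List (List String)) (num : String) (out : List (List (List String))) : Decidable (Spec_generate_grids_with_num grid num out) := by unfold Spec_generate_grids_with_num; infer_instance

-- ===== CLAIM (what is proved, stated in full; the proofs are below) =====
def Claim_equal_generate_grids_with_num : Prop := ∀ (grid : List (List String)) (num : String), Dom_generate_grids_with_num grid num → Pre_generate_grids_with_num grid num → Spec_generate_grids_with_num grid num (generate_grids_with_num grid num)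

-- ===== LEMMAS AND PROOFS =====

theorem pv_witness_ok :
    Dom_generate_grids_with_num pvWitness_generate_grids_with_num.1 pvWitness_generate_grids_with_num.2 ∧
    Pre_generate_grids_with_num pvWitness_generate_grids_with_num.1 pvWitness_generate_grids_with_num.2 := by
  constructor <;> decide

theorem pvBool_eq_of_iff {a b : Bool} (h : a = true ↔ b = true) : a = b := by
  cases a <;> cases b <;> simp_all

theorem pvAny_congr {γ : Type} {p q : γ → Bool} : ∀ {l : List γ}, (∀ x ∈ l, p x = q x) → l.any p = l.any q := by
  intro l
  induction l with
  | nil => intro _; rfl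
  | cons x xs ih =>
    intro h
    simp only [List.any_cons, h x (by simp), ih (fun y hy => h y (by simp [hy]))]

theorem pvFoldRel {α β γ : Type} (R : α → β → Prop) (f : α → γ → α) (g : β → γ → β) :
    ∀ (l : List γ) (a : α) (b : β), R a b →
      (∀ a' b' x, x ∈ l → R a' b' → R (f a' x) (g b' x)) →
      R (l.foldl f a) (l.foldl g b) := by
  intro l
  induction l with
  | nil => intro a b h _; exact h
  | cons x xs ih =>
    intro a b h hstep
    exact ih _ _ (hstep a b x (by simp) h) (fun a' b' y hy => hstep a' b' y (by simp [hy]))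

theorem pvIntSqrtGo_pos {N : Nat} (hN : 0 < N) : ∀ m, 0 < m → 0 < pvIntSqrtGo N m := by
  intro m
  induction m with
  | zero => intro h; omega
  | succ k ih =>
    intro _
    unfold pvIntSqrtGo
    split
    · omega
    · rename_i hle
      rcases Nat.eq_zero_or_pos k with hk | hk
      · subst hk; simp at hle; omega
      · exact ih hk

theorem pvIntSqrt_pos {N : Nat} (hN : 0 < N) : 0 < pvIntSqrt N :=
  pvIntSqrtGo_pos hN N hN

theorem pvLength_set2 {α : Type} (g : List (List α)) (r c : Nat) (v : α) :
    (pvSet2 g r c v).length = g.length := by simp [pvSet2]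

theorem pvRow_mem {α : Type} {g : List (List α)} {r : Nat} (hr : r < g.length) : g.getD r [] ∈ g := by
  rw [List.getD_eq_getElem?_getD, List.getElem?_eq_getElem hr]
  exact List.getElem_mem hr

theorem pvShape_set2 {α : Type} {g : List (List α)} {N : Nat}
    (hs : ∀ row ∈ g, row.length = N) (r c : Nat) (v : α) (hr : r < g.length) :
    ∀ row ∈ pvSet2 g r c v, row.length = N := by
  intro row hrow
  rcases List.mem_or_eq_of_mem_set hrow with h | h
  · exact hs row h
  · subst h
    rw [List.length_set]
    exact hs _ (pvRow_mem hr)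

theorem pvGet2_set2 {α : Type} (d : α) (g : List (List α)) (r0 c0 : Nat) (v : α)
    (hr0 : r0 < g.length) (hc0 : c0 < (g.getD r0 []).length) (r c : Nat) :
    pvGet2 d (pvSet2 g r0 c0 v) r c = if r = r0 ∧ c = c0 then v else pvGet2 d g r c := by
  unfold pvGet2 pvSet2
  by_cases hr : r = r0
  · subst hr
    have houter : (g.set r ((g.getD r []).set c0 v))[r]? = some ((g.getD r []).set c0 v) := by
      simp [hr0]
    rw [List.getD_eq_getElem?_getD (l := g.set r ((g.getD r []).set c0 v)) (i := r), houter, Option.getD_some,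
      List.getD_eq_getElem?_getD (l := (g.getD r []).set c0 v), List.getElem?_set]
    by_cases hcc : c = c0
    · subst hcc
      rw [List.getD_eq_getElem?_getD] at hc0
      simp [hc0]
    · have hcc' : ¬ c0 = c := fun h => hcc h.symm
      simp [hcc, hcc', List.getD_eq_getElem?_getD]
  · have hr' : ¬ r0 = r := fun h => hr h.symm
    have houter : (g.set r0 ((g.getD r0 []).set c0 v))[r]? = g[r]? := by
      rw [List.getElem?_set, if_neg hr']
    rw [List.getD_eq_getElem?_getD (l := g.set r0 ((g.getD r0 []).set c0 v)) (i := r), houter]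
    simp [hr, List.getD_eq_getElem?_getD]

theorem pvFlag_set {r0 : Nat} {flags : List Bool} (h : r0 < flags.length) (r : Nat) :
    (flags.set r0 true).getD r false = if r = r0 then true else flags.getD r false := by
  rw [List.getD_eq_getElem?_getD, List.getElem?_set]
  by_cases hr : r = r0
  · subst hr; simp [h]
  · have hr' : ¬ r0 = r := fun hx => hr hx.symm
    simp [hr, hr', List.getD_eq_getElem?_getD]

-- 'num in row' over a length-N row equals A's index scan of the first N entries
theorem pvContains_eq_any {row : List String} {N : Nat} (h : row.length = N) (num : String) :
    row.contains num = (List.range N).any (fun i => row.getD i "" == num) := by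
  apply pvBool_eq_of_iff
  simp only [List.contains_eq_mem, decide_eq_true_eq, List.any_eq_true, List.mem_range]
  constructor
  · intro hm
    rcases List.mem_iff_getElem.mp hm with ⟨i, hi, hig⟩
    exact ⟨i, by omega, by simp [List.getD_eq_getElem?_getD, List.getElem?_eq_getElem hi, hig]⟩
  · rintro ⟨i, hi, he⟩
    have hi' : i < row.length := by omega
    rw [List.getD_eq_getElem?_getD, List.getElem?_eq_getElem hi'] at he
    simp only [Option.getD_some, beq_iff_eq] at he
    exact he ▸ List.getElem_mem hi'

theorem pvAll_getD (l : List Bool) : l.all (fun b => b) = (List.range l.length).all (fun i => l.getD i false) := by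
  apply pvBool_eq_of_iff
  simp only [List.all_eq_true, List.mem_range]
  constructor
  · intro h i hi
    rw [List.getD_eq_getElem?_getD, List.getElem?_eq_getElem hi]
    exact h _ (List.getElem_mem hi)
  · intro h b hb
    rcases List.mem_iff_getElem.mp hb with ⟨i, hi, hig⟩
    have := h i hi
    rw [List.getD_eq_getElem?_getD, List.getElem?_eq_getElem hi] at this
    simp only [Option.getD_some] at this
    exact hig ▸ this

theorem pvFoldAppend {γ σ : Type} (F : γ → List σ) :
    ∀ (l : List γ) (init : List σ), l.foldl (fun acc x => acc ++ F x) init = init ++ l.flatMap F := by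
  intro l
  induction l with
  | nil => simp
  | cons x xs ih => intro init; simp [List.foldl_cons, ih, List.flatMap_cons]

theorem pvFlatMap_singleton {γ σ : Type} (e : γ → σ) : ∀ l : List γ, l.flatMap (fun x => [e x]) = l.map e := by
  intro l; induction l <;> simp_all

theorem pvSubgrid_char (g : List (List String)) (num : String) (r c : Nat) :
    validate_subgrid g num r c =
      (List.range (pvIntSqrt g.length)).any (fun i => (List.range (pvIntSqrt g.length)).any (fun j =>
        pvGet2 "" g ((r / pvIntSqrt g.length) * pvIntSqrt g.length + i)
                   ((c / pvIntSqrt g.length) * pvIntSqrt g.length + j) == num)) := by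
  unfold validate_subgrid subgrid_values
  have h2 : ∀ (n rr cc i : Nat) (init : List String),
      (List.range n).foldl (fun val j => val ++ [pvGet2 "" g (rr + i) (cc + j)]) init =
        init ++ (List.range n).map (fun j => pvGet2 "" g (rr + i) (cc + j)) := by
    intro n rr cc i init
    rw [pvFoldAppend (fun j => [pvGet2 "" g (rr + i) (cc + j)])]
    rw [pvFlatMap_singleton]
  have h1 : ∀ (n rr cc : Nat),
      (List.range n).foldl (fun val i => (List.range n).foldl (fun val j => val ++ [pvGet2 "" g (rr + i) (cc + j)]) val) [] =
        (List.range n).flatMap (fun i => (List.range n).map (fun j => pvGet2 "" g (rr + i) (cc + j))) := by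
    intro n rr cc
    rw [PySem.List.foldl_congr_mem (List.range n) _
      (fun val i => val ++ (List.range n).map (fun j => pvGet2 "" g (rr + i) (cc + j))) []
      (fun acc i _ => h2 n rr cc i acc)]
    rw [pvFoldAppend]; rfl
  rw [h1]
  rw [List.any_flatMap]
  apply pvAny_congr
  intro i _
  rw [List.any_map]
  rfl

-- the fold invariant tying A's grid to B's (grid, flags) state
def pvInv (num : String) (N n nb : Nat) (gA : List (List String))
    (st : List (List String) × List Bool × List Bool × List (List Bool)) : Prop :=
  st.1 = gA ∧ gA.length = N ∧ (∀ row ∈ gA, row.length = N) ∧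
  st.2.1.length = N ∧ st.2.2.1.length = N ∧
  st.2.2.2.length = nb ∧ (∀ row ∈ st.2.2.2, row.length = nb) ∧
  (∀ r, r < N → st.2.1.getD r false = validate_row gA num r) ∧
  (∀ c, c < N → st.2.2.1.getD c false = validate_col gA num c) ∧
  (∀ r c, r < N → c < N → pvGet2 false st.2.2.2 (r / n) (c / n) = validate_subgrid gA num r c)

theorem pvDiv_lt {N n nb r : Nat} (hn : 0 < n) (hmul : nb * n = N) (hr : r < N) : r / n < nb :=
  (Nat.div_lt_iff_lt_mul hn).mpr (by omega)

theorem pvDiv_add {n q i : Nat} (hn : 0 < n) (hi : i < n) : (q * n + i) / n = q := by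
  rw [Nat.mul_comm q n, Nat.mul_add_div hn, Nat.div_eq_of_lt hi]
  omega

theorem pvValidate_row_set2 {g : List (List String)} {N : Nat} (num : String)
    (hlen : g.length = N) (hs : ∀ row ∈ g, row.length = N) {r0 c0 : Nat} (hr0 : r0 < N) (hc0 : c0 < N) (r : Nat) :
    validate_row (pvSet2 g r0 c0 num) num r = if r = r0 then true else validate_row g num r := by
  have hrow : (g.getD r0 []).length = N := hs _ (pvRow_mem (by omega))
  have hget := pvGet2_set2 "" g r0 c0 num (by omega) (by omega)
  unfold validate_row
  rw [pvLength_set2]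
  by_cases hr : r = r0
  · subst hr
    rw [if_pos rfl]
    apply (List.any_eq_true).mpr
    refine ⟨c0, List.mem_range.mpr (by omega), ?_⟩
    rw [hget r c0, if_pos ⟨rfl, rfl⟩]
    simp
  · rw [if_neg hr]
    apply pvAny_congr
    intro i _
    rw [hget r i, if_neg (fun h => hr h.1)]

theorem pvValidate_col_set2 {g : List (List String)} {N : Nat} (num : String)
    (hlen : g.length = N) (hs : ∀ row ∈ g, row.length = N) {r0 c0 : Nat} (hr0 : r0 < N) (hc0 : c0 < N) (c : Nat) :
    validate_col (pvSet2 g r0 c0 num) num c = if c = c0 then true else validate_col g num c := by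
  have hrow : (g.getD r0 []).length = N := hs _ (pvRow_mem (by omega))
  have hget := pvGet2_set2 "" g r0 c0 num (by omega) (by omega)
  unfold validate_col
  rw [pvLength_set2]
  by_cases hc : c = c0
  · subst hc
    rw [if_pos rfl]
    apply (List.any_eq_true).mpr
    refine ⟨r0, List.mem_range.mpr (by omega), ?_⟩
    rw [hget r0 c, if_pos ⟨rfl, rfl⟩]
    simp
  · rw [if_neg hc]
    apply pvAny_congr
    intro i _
    rw [hget i c, if_neg (fun h => hc h.2)]

theorem pvValidate_sub_set2 {g : List (List String)} {N n : Nat} (num : String)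
    (hlen : g.length = N) (hs : ∀ row ∈ g, row.length = N) (hn : 0 < n) (hsq : pvIntSqrt N = n)
    {r0 c0 : Nat} (hr0 : r0 < N) (hc0 : c0 < N) (r c : Nat) :
    validate_subgrid (pvSet2 g r0 c0 num) num r c =
      if r / n = r0 / n ∧ c / n = c0 / n then true else validate_subgrid g num r c := by
  have hrow : (g.getD r0 []).length = N := hs _ (pvRow_mem (by omega))
  have hget := pvGet2_set2 "" g r0 c0 num (by omega) (by omega)
  have hchar1 := pvSubgrid_char (pvSet2 g r0 c0 num) num r c
  have hchar2 := pvSubgrid_char g num r c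
  rw [pvLength_set2, hlen, hsq] at hchar1
  rw [hlen, hsq] at hchar2
  rw [hchar1, hchar2]
  by_cases hbox : r / n = r0 / n ∧ c / n = c0 / n
  · rw [if_pos hbox]
    apply (List.any_eq_true).mpr
    refine ⟨r0 % n, List.mem_range.mpr (Nat.mod_lt _ hn), ?_⟩
    apply (List.any_eq_true).mpr
    refine ⟨c0 % n, List.mem_range.mpr (Nat.mod_lt _ hn), ?_⟩
    have e1 : (r / n) * n + r0 % n = r0 := by
      rw [hbox.1, Nat.mul_comm]
      have := Nat.div_add_mod r0 n
      omega
    have e2 : (c / n) * n + c0 % n = c0 := by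
      rw [hbox.2, Nat.mul_comm]
      have := Nat.div_add_mod c0 n
      omega
    rw [e1, e2, hget r0 c0, if_pos ⟨rfl, rfl⟩]
    simp
  · rw [if_neg hbox]
    apply pvAny_congr
    intro i hi
    apply pvAny_congr
    intro j hj
    rw [hget _ _, if_neg]
    rintro ⟨h1, h2⟩
    apply hbox
    constructor
    · rw [← h1, pvDiv_add hn (List.mem_range.mp hi)]
    · rw [← h2, pvDiv_add hn (List.mem_range.mp hj)]

-- placing num at an in-range cell and setting the three flags preserves the invariant
theorem pvInv_place {num : String} {N n nb : Nat} {gA : List (List String)}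
    {st : List (List String) × List Bool × List Bool × List (List Bool)}
    (hn : 0 < n) (hmul : nb * n = N) (hsq : pvIntSqrt N = n)
    (hinv : pvInv num N n nb gA st) {r0 c0 : Nat} (hr0 : r0 < N) (hc0 : c0 < N) :
    pvInv num N n nb (pvSet2 gA r0 c0 num)
      (pvSet2 st.1 r0 c0 num, st.2.1.set r0 true, st.2.2.1.set c0 true,
       pvSet2 st.2.2.2 (r0 / n) (c0 / n) true) := by
  obtain ⟨h1, h2, h3, h4, h5, h6, h7, h8, h9, h10⟩ := hinv
  have hbr0 : r0 / n < nb := pvDiv_lt hn hmul hr0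
  have hbc0 : c0 / n < nb := pvDiv_lt hn hmul hc0
  have hbrow : (st.2.2.2.getD (r0 / n) []).length = nb := h7 _ (pvRow_mem (by omega))
  refine ⟨by rw [h1], ?_, ?_, ?_, ?_, ?_, ?_, ?_, ?_, ?_⟩
  · rw [pvLength_set2]; exact h2
  · exact pvShape_set2 h3 r0 c0 num (by omega)
  · simp [h4]
  · simp [h5]
  · rw [pvLength_set2]; exact h6
  · exact pvShape_set2 h7 (r0 / n) (c0 / n) true (by omega)
  · intro r hr
    rw [pvFlag_set (by omega) r, pvValidate_row_set2 num h2 h3 hr0 hc0 r]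
    by_cases h : r = r0
    · rw [if_pos h, if_pos h]
    · rw [if_neg h, if_neg h]
      exact h8 r hr
  · intro c hc
    rw [pvFlag_set (by omega) c, pvValidate_col_set2 num h2 h3 hr0 hc0 c]
    by_cases h : c = c0
    · rw [if_pos h, if_pos h]
    · rw [if_neg h, if_neg h]
      exact h9 c hc
  · intro r c hr hc
    have hbr : r / n < nb := pvDiv_lt hn hmul hr
    have hbc : c / n < nb := pvDiv_lt hn hmul hc
    rw [pvGet2_set2 false st.2.2.2 (r0 / n) (c0 / n) true (by omega) (by omega) (r / n) (c / n)]
    rw [pvValidate_sub_set2 num h2 h3 hn hsq hr0 hc0 r c]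
    by_cases h : r / n = r0 / n ∧ c / n = c0 / n
    · rw [if_pos h, if_pos h]
    · rw [if_neg h, if_neg h]
      exact h10 r c hr hc

-- the two fill conditions agree under the invariant
theorem pvCondEq {num : String} {N n nb : Nat} {gA : List (List String)}
    {st : List (List String) × List Bool × List Bool × List (List Bool)}
    (hinv : pvInv num N n nb gA st) {r c : Nat} (hr : r < N) (hc : c < N) :
    (pvGet2 "" gA r c == "x" && valid_entry gA num r c) =
      (pvGet2 "" st.1 r c == "x" &&
        !(st.2.1.getD r false || st.2.2.1.getD c false || pvGet2 false st.2.2.2 (r / n) (c / n))) := by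
  obtain ⟨h1, h2, h3, h4, h5, h6, h7, h8, h9, h10⟩ := hinv
  rw [h1, h8 r hr, h9 c hc, h10 r c hr hc]
  unfold valid_entry
  by_cases hx : (pvGet2 "" gA r c == "x") = true
  · rw [if_pos hx, hx]
    cases validate_row gA num r <;> cases validate_col gA num c <;> cases validate_subgrid gA num r c <;> rfl
  · have hx' : (pvGet2 "" gA r c == "x") = false := by
      cases h : (pvGet2 "" gA r c == "x") <;> simp_all
    rw [if_neg hx, hx']
    rfl

-- one cell of the greedy fill preserves the invariant
theorem pvStep {num : String} {N n nb : Nat} {gA : List (List String)}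
    {st : List (List String) × List Bool × List Bool × List (List Bool)}
    (hn : 0 < n) (hmul : nb * n = N) (hsq : pvIntSqrt N = n)
    (hinv : pvInv num N n nb gA st) {r c : Nat} (hr : r < N) (hc : c < N) :
    pvInv num N n nb
      (if pvGet2 "" gA r c == "x" && valid_entry gA num r c then pvSet2 gA r c num else gA)
      (if pvGet2 "" st.1 r c == "x" &&
          !(st.2.1.getD r false || st.2.2.1.getD c false || pvGet2 false st.2.2.2 (r / n) (c / n)) then
        (pvSet2 st.1 r c num, st.2.1.set r true, st.2.2.1.set c true,
         pvSet2 st.2.2.2 (r / n) (c / n) true)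
      else st) := by
  rw [← pvCondEq hinv hr hc]
  by_cases hcond : (pvGet2 "" gA r c == "x" && valid_entry gA num r c) = true
  · rw [if_pos hcond, if_pos hcond]
    exact pvInv_place hn hmul hsq hinv hr hc
  · rw [if_neg hcond, if_neg hcond]
    exact hinv

theorem pvCheckEq {num : String} {N n nb : Nat} {m : List (List String)}
    {st : List (List String) × List Bool × List Bool × List (List Bool)}
    (hinv : pvInv num N n nb m st) :
    check_num_in_all_rows m num = st.2.1.all (fun b => b) := by
  obtain ⟨h1, h2, h3, h4, h5, h6, h7, h8, h9, h10⟩ := hinv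
  unfold check_num_in_all_rows
  rw [pvAll_getD, h4, h2]
  apply pvBool_eq_of_iff
  simp only [List.all_eq_true, List.mem_range]
  constructor
  · intro h r hr
    rw [h8 r hr]
    have := h r hr
    rw [pvContains_eq_any (h3 _ (pvRow_mem (by omega))) num] at this
    unfold validate_row
    rw [h2]
    exact this
  · intro h r hr
    have := h r hr
    rw [h8 r hr] at this
    unfold validate_row at this
    rw [h2] at this
    rw [pvContains_eq_any (h3 _ (pvRow_mem (by omega))) num]
    exact this

-- the initial flag tables satisfy the invariant on the input grid
theorem pvInv_init {grid : List (List String)} {num : String} {N n nb : Nat}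
    (hlen : grid.length = N) (hs : ∀ row ∈ grid, row.length = N)
    (hn : 0 < n) (hmul : nb * n = N) (hsq : pvIntSqrt N = n) :
    pvInv num N n nb grid
      (grid, grid.map (fun row => row.contains num),
       (List.range N).map (fun c => (List.range N).any (fun r => pvGet2 "" grid r c == num)),
       (List.range nb).map (fun br => (List.range nb).map (fun bc =>
         (List.range n).any (fun i => (List.range n).any (fun j => pvGet2 "" grid (br * n + i) (bc * n + j) == num))))) := by
  refine ⟨rfl, hlen, hs, by simp [hlen], by simp, by simp, ?_, ?_, ?_, ?_⟩
  · intro row hrow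
    rcases List.mem_map.mp hrow with ⟨br, _, hbr⟩
    simp [← hbr]
  · intro r hr
    have hr' : r < grid.length := by omega
    rw [List.getD_eq_getElem?_getD, List.getElem?_map, List.getElem?_eq_getElem hr']
    simp only [Option.map_some, Option.getD_some]
    rw [pvContains_eq_any (hs _ (List.getElem_mem hr')) num]
    unfold validate_row
    rw [hlen]
    apply pvAny_congr
    intro i _
    simp [pvGet2, List.getD_eq_getElem?_getD, List.getElem?_eq_getElem hr']
  · intro c hc
    rw [List.getD_eq_getElem?_getD, List.getElem?_map, List.getElem?_range hc]
    simp only [Option.map_some, Option.getD_some]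
    unfold validate_col
    rw [hlen]
  · intro r c hr hc
    have hbr : r / n < nb := pvDiv_lt hn hmul hr
    have hbc : c / n < nb := pvDiv_lt hn hmul hc
    simp only [pvGet2, List.getD_eq_getElem?_getD, List.getElem?_map,
      List.getElem?_range hbr, List.getElem?_range hbc, Option.map_some, Option.getD_some]
    rw [pvSubgrid_char grid num r c, hlen, hsq]
    rfl

-- B's place-and-fill computes exactly A's fill-then-check on the candidate cell
theorem pvPAF_eq {grid : List (List String)} {num : String} {N n nb : Nat}
    {rh ch : List Bool} {bh : List (List Bool)}
    (hn : 0 < n) (hmul : nb * n = N) (hsq : pvIntSqrt N = n)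
    (hinv : pvInv num N n nb grid (grid, rh, ch, bh)) {r c : Nat} (hr : r < N) (hc : c < N) :
    pvPlaceAndFill grid num N n rh ch bh r c =
      (if check_num_in_all_rows (fill_in (pvSet2 grid r c num) num) num then
        some (fill_in (pvSet2 grid r c num) num)
      else none) := by
  have hinv0 := pvInv_place hn hmul hsq hinv hr hc
  have hlen1 : (pvSet2 grid r c num).length = N := by
    rw [pvLength_set2]; exact hinv.2.1
  have hfold : pvInv num N n nb (fill_in (pvSet2 grid r c num) num)
      ((List.range N).foldl (fun st r' =>
        (List.range N).foldl (fun st c' =>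
          if pvGet2 "" st.1 r' c' == "x" && !(st.2.1.getD r' false || st.2.2.1.getD c' false || pvGet2 false st.2.2.2 (r' / n) (c' / n)) then
            (pvSet2 st.1 r' c' num, st.2.1.set r' true, st.2.2.1.set c' true, pvSet2 st.2.2.2 (r' / n) (c' / n) true)
          else st) st)
        (pvSet2 grid r c num, rh.set r true, ch.set c true, pvSet2 bh (r / n) (c / n) true)) := by
    unfold fill_in
    rw [hlen1]
    exact pvFoldRel (pvInv num N n nb) _ _ (List.range N) _ _ hinv0
      (fun a' b' x hx hR =>
        pvFoldRel (pvInv num N n nb) _ _ (List.range N) _ _ hR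
          (fun a'' b'' y hy hR' =>
            pvStep hn hmul hsq hR' (List.mem_range.mp hx) (List.mem_range.mp hy)))
  simp only [pvPlaceAndFill]
  rw [pvCheckEq hfold, hfold.1]

-- the nb B computes, (N-1)/n + 1, satisfies nb * n = N when 0 < n ∣ N
theorem pvNb_mul {N n : Nat} (hN : 0 < N) (hn : 0 < n) (hdvd : n ∣ N) :
    ((N - 1) / n + 1) * n = N := by
  obtain ⟨k, hk⟩ := hdvd
  have hk1 : 0 < k := by
    rcases Nat.eq_zero_or_pos k with h | h
    · subst h; omega
    · exact h
  have hnN : n ≤ N := by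
    calc n = n * 1 := by omega
    _ ≤ n * k := Nat.mul_le_mul_left n hk1
    _ = N := hk.symm
  have hdiv : (N - 1) / n = k - 1 := by
    apply Nat.div_eq_of_lt_le
    · have : (k - 1) * n = N - n := by
        rw [Nat.sub_mul, one_mul, Nat.mul_comm k n, ← hk]
      omega
    · have : (k - 1 + 1) * n = N := by
        rw [Nat.sub_add_cancel hk1, Nat.mul_comm k n, ← hk]
      omega
  rw [hdiv, Nat.sub_add_cancel hk1, Nat.mul_comm k n, ← hk]

-- ===== VERDICT (by name: the statement is the Claim_ definition above) =====
theorem generate_grids_with_num_spec : Claim_equal_generate_grids_with_num := by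
  intro grid num _ hpre
  obtain ⟨hs, hdvd⟩ := hpre
  unfold Spec_generate_grids_with_num
  by_cases hN0 : grid.length = 0
  · unfold generate_grids_with_num generate_grids_with_num_alt
    rw [hN0]
    rfl
  · have hN : 0 < grid.length := by omega
    set N := grid.length with hNdef
    set n := pvIntSqrt N with hndef
    have hn : 0 < n := pvIntSqrt_pos hN
    have hmul : ((N - 1) / n + 1) * n = N := pvNb_mul hN hn hdvd
    set nb := (N - 1) / n + 1 with hnbdef
    have hinv0 := pvInv_init (num := num) (rfl) hs hn hmul rfl
    unfold generate_grids_with_num generate_grids_with_num_alt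
    rw [if_neg hN0]
    apply Eq.symm
    apply PySem.List.foldl_congr_mem
    intro L r hrm
    apply PySem.List.foldl_congr_mem
    intro L' c hcm
    have hr : r < N := List.mem_range.mp hrm
    have hc : c < N := List.mem_range.mp hcm
    rw [← pvCondEq hinv0 hr hc]
    by_cases hcond : (pvGet2 "" grid r c == "x" && valid_entry grid num r c) = true
    · rw [if_pos hcond, if_pos hcond]
      rw [pvPAF_eq hn hmul rfl hinv0 hr hc]
      by_cases hchk : check_num_in_all_rows (fill_in (pvSet2 grid r c num) num) num = true
      · rw [if_pos hchk, if_pos hchk]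
      · rw [if_neg hchk, if_neg hchk]
    · rw [if_neg hcond, if_neg hcond]
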